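-- pv_equiv track=rewrite | github.com/onaeonae1/ProblemSolving | Programmers/파일명_정렬.py | parse
-- ===== SOURCE A (Python) =====
-- def parse(file:str):
--     flag = False
--     num_sti = -1
--     num_edi = -1
--
--     for idx, item in enumerate(file):
--         if item.isdigit():
--             if not flag:
--                 flag = True
--                 num_sti = idx
--                 num_edi = idx
--             else:
--                 num_edi = num_edi if num_edi > idx else idx
--         elif flag:
--             break
--     return num_sti, num_edi
-- ===== SOURCE B (Python) =====
-- def parse(file: str):
--     start = -1
--     rest = ""
--     for i, c in enumerate(file):
--         if c.isdigit():
--             start, rest = i, file[i + 1:]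
--             break
--     if start == -1:
--         return -1, -1
--     end = start
--     for c in rest:
--         if not c.isdigit():
--             break
--         end += 1
--     return start, end
-- ===== Notes on version B (the rewrite author's own statement) =====
-- stated objective: simpler
-- what changed: Replaces the single flagged state-machine loop (flag/num_sti/num_edi with a max-update) by a find-then-extend decomposition: locate the first digit, then count the following digits over the tail slice.
import Mathlib
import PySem

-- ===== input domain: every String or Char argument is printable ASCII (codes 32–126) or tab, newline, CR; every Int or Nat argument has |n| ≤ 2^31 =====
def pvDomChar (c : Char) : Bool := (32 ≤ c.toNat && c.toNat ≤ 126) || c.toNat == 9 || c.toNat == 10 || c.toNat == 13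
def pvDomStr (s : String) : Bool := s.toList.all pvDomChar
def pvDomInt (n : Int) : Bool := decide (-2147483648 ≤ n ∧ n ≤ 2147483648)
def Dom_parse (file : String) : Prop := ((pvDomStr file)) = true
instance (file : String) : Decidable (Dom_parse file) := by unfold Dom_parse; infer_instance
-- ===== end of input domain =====

-- B replaces A's single flagged state-machine loop by a find-then-extend decomposition
-- (locate the first digit, then count the following digits over the tail slice); objective: simpler.

-- ===== PORT A =====
-- the flagged for-loop of A: state (flag, num_sti, num_edi), `break` returns the state
def parseLoopA : List Char → Int → Bool → Int → Int → Int × Int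
  | [], _, _, sti, edi => (sti, edi)
  | c :: cs, idx, flag, sti, edi =>
    if PySem.Chars.isdigit c then
      if !flag then parseLoopA cs (idx + 1) true idx idx
      else parseLoopA cs (idx + 1) flag sti (if edi > idx then edi else idx)
    else if flag then (sti, edi)
    else parseLoopA cs (idx + 1) flag sti edi

def parse (file : String) : Int × Int :=
  parseLoopA file.toList 0 false (-1) (-1)

-- ===== PORT B =====
-- first loop of Source B: find the first digit's index (and the tail slice after it)
def bFind : List Char → Int → Option Int
  | [], _ => none
  | c :: cs, i => if PySem.Chars.isdigit c then some i else bFind cs (i + 1)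

-- second loop of Source B: `end += 1` while the characters of `rest` are digits, break otherwise
def bExtend : List Char → Int → Int
  | [], e => e
  | c :: cs, e => if !(PySem.Chars.isdigit c) then e else bExtend cs (e + 1)

def parse_alt (file : String) : Int × Int :=
  match bFind file.toList 0 with
  | none => (-1, -1)
  | some s => (s, bExtend (PySem.List.slice file.toList (some (s + 1)) none) s)

-- ===== PRECONDITION & SPEC =====
def Spec_parse (file : String) (out : Int × Int) : Prop := out = parse_alt file
instance (file : String) (out : Int × Int) : Decidable (Spec_parse file out) := by unfold Spec_parse; infer_instance

-- ===== CLAIM (what is proved, stated in full; the proofs are below) =====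
def Claim_equal_parse : Prop := ∀ (file : String), Dom_parse file → Spec_parse file (parse file)

-- ===== LEMMAS AND PROOFS =====

-- once the flag is set with num_edi = current index - 1, A's loop just extends like B's second loop
lemma loopA_flagged (cs : List Char) : ∀ (i sti : Int),
    parseLoopA cs (i + 1) true sti i = (sti, bExtend cs i) := by
  induction cs with
  | nil => intro i sti; simp [parseLoopA, bExtend]
  | cons c cs ih =>
    intro i sti
    by_cases h : PySem.Chars.isdigit c
    · have hstep : parseLoopA (c :: cs) (i + 1) true sti i
            = parseLoopA cs (i + 1 + 1) true sti (i + 1) := by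
        simp [parseLoopA, h]
      rw [hstep, ih (i + 1) sti]
      simp [bExtend, h]
    · simp [parseLoopA, bExtend, h]

lemma bFind_ge (cs : List Char) : ∀ (i s : Int), bFind cs i = some s → i ≤ s := by
  induction cs with
  | nil => intro i s h; simp [bFind] at h
  | cons c cs ih =>
    intro i s h
    by_cases hd : PySem.Chars.isdigit c
    · simp [bFind, hd] at h; omega
    · simp [bFind, hd] at h
      have := ih (i + 1) s h; omega

-- A's whole loop (flag still false) equals B's find-then-extend over the remaining suffix
lemma loopA_unflagged (cs : List Char) : ∀ (i : Int),
    parseLoopA cs i false (-1) (-1) =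
      (match bFind cs i with
       | none => ((-1 : Int), (-1 : Int))
       | some s => (s, bExtend (cs.drop ((s - i).toNat + 1)) s)) := by
  induction cs with
  | nil => intro i; simp [parseLoopA, bFind]
  | cons c cs ih =>
    intro i
    by_cases hd : PySem.Chars.isdigit c
    · have h0 : (i - i).toNat = 0 := by omega
      simp [parseLoopA, bFind, hd, loopA_flagged cs i i]
    · have hstep : parseLoopA (c :: cs) i false (-1) (-1)
            = parseLoopA cs (i + 1) false (-1) (-1) := by simp [parseLoopA, hd]
      have hfstep : bFind (c :: cs) i = bFind cs (i + 1) := by simp [bFind, hd]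
      rw [hstep, ih (i + 1), hfstep]
      cases hfind : bFind cs (i + 1) with
      | none => rfl
      | some s =>
        have hge := bFind_ge cs (i + 1) s hfind
        have hnat : (s - i).toNat + 1 = ((s - (i + 1)).toNat + 1) + 1 := by omega
        simp [hnat]

-- ===== VERDICT (by name: the statement is the Claim_ definition above) =====
theorem parse_spec : Claim_equal_parse := by
  intro file _
  unfold Spec_parse parse parse_alt
  rw [loopA_unflagged file.toList 0]
  cases hfind : bFind file.toList 0 with
  | none => rfl
  | some s =>
    have hge := bFind_ge file.toList 0 s hfind
    show (s, bExtend (file.toList.drop ((s - 0).toNat + 1)) s)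
        = (s, bExtend (PySem.List.slice file.toList (some (s + 1)) none) s)
    rw [PySem.List.slice_from _ (by omega)]
    have hdrop : ((s - 0).toNat + 1) = (s + 1).toNat := by omega
    rw [hdrop]
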